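-- pv_equiv track=rewrite | github.com/haseung/nd-datastruct-algorithms-project1 | Task4.py | teleMarket
-- ===== SOURCE A (Python) =====
-- def teleMarket(callDict, textDict):
--     spamDict = {}
--     num140 = 0
--     numNotext = 0
--
--     for key in callDict:
--         # include numbers that start with 140
--         if key.startswith('140'):
--             spamDict[key] = key
--             num140 += 1
--
--         # include numbers that are not in texts
--         elif not key in textDict.keys():
--             spamDict[key] = key
--             numNotext += 1
--     return spamDict
-- ===== SOURCE B (Python) =====
-- def teleMarket(callDict, textDict):
--     notTexted = set(callDict) - set(textDict)
--     starts140 = {k for k in callDict if k.startswith('140')}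
--     spamKeys = notTexted | starts140
--     return {k: k for k in callDict if k in spamKeys}
-- ===== Notes on version B (the rewrite author's own statement) =====
-- stated objective: alternative
-- what changed: Replaces A's single loop that tests each key and inserts into a dict (carrying two unused counters) with bulk set algebra: build the not-texted set by set difference and the 140-prefixed set by a comprehension, union them into a spam key set, and produce the result dict by one comprehension filtering on membership in that set.
import Mathlib
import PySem

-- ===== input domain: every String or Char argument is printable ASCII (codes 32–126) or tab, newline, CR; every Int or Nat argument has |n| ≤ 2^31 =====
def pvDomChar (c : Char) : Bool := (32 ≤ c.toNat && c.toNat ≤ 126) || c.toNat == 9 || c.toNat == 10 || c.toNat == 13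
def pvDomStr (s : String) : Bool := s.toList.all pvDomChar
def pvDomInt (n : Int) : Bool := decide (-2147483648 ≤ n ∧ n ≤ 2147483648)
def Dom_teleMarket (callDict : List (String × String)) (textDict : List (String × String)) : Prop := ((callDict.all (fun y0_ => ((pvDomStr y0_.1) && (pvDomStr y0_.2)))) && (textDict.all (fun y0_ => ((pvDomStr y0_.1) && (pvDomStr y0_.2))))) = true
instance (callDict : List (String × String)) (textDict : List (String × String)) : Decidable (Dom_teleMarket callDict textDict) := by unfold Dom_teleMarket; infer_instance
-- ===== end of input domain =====

-- B replaces A's per-key filtering loop (with its unused counters) by bulk set algebra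
-- (difference/union of key sets, then one membership comprehension); return value only, no speed claim.

-- ===== PORT A =====
-- A iterates the dict's keys, inserting spam keys and bumping two counters it never uses.
def teleMarket (callDict : List (String × String)) (textDict : List (String × String)) : List (String × String) :=
  let td := PySem.Dict.ofList textDict
  let st := (PySem.Dict.ofList callDict).keys.foldl
    (fun (st : PySem.Dict String String × Int × Int) key =>
      if PySem.Str.startswith key "140" then (st.1.insert key key, st.2.1 + 1, st.2.2)
      else if !(td.contains key) then (st.1.insert key key, st.2.1, st.2.2 + 1)
      else st)
    (PySem.Dict.empty, 0, 0)
  st.1.items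

-- ===== PORT B =====
def teleMarket_alt (callDict : List (String × String)) (textDict : List (String × String)) : List (String × String) :=
  let callKeys : PySem.Set String := PySem.Set.ofList (callDict.map Prod.fst)
  let textKeys : PySem.Set String := PySem.Set.ofList (textDict.map Prod.fst)
  let notTexted : PySem.Set String := PySem.Set.diff callKeys textKeys
  let starts140 : PySem.Set String := PySem.Set.ofList (callKeys.filter (fun k => PySem.Str.startswith k "140"))
  let spamKeys : PySem.Set String := PySem.Set.union notTexted starts140
  (callKeys.filter (fun k => PySem.Set.contains spamKeys k)).map (fun k => (k, k))

-- ===== PRECONDITION & SPEC =====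
def Spec_teleMarket (callDict : List (String × String)) (textDict : List (String × String)) (out : List (String × String)) : Prop := out = teleMarket_alt callDict textDict
instance (callDict : List (String × String)) (textDict : List (String × String)) (out : List (String × String)) : Decidable (Spec_teleMarket callDict textDict out) := by unfold Spec_teleMarket; infer_instance

-- ===== CLAIM (what is proved, stated in full; the proofs are below) =====
def Claim_equal_teleMarket : Prop := ∀ (callDict : List (String × String)) (textDict : List (String × String)), Dom_teleMarket callDict textDict → Spec_teleMarket callDict textDict (teleMarket callDict textDict)

-- ===== LEMMAS AND PROOFS =====

theorem foldA_items (td : PySem.Dict String String) :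
    ∀ (K : List String) (spam : PySem.Dict String String) (n m : Int),
    K.Nodup → (∀ k ∈ K, spam.contains k = false) →
    (K.foldl
      (fun (st : PySem.Dict String String × Int × Int) key =>
        if PySem.Str.startswith key "140" then (st.1.insert key key, st.2.1 + 1, st.2.2)
        else if !(td.contains key) then (st.1.insert key key, st.2.1, st.2.2 + 1)
        else st)
      (spam, n, m)).1.items
    = spam.items ++ (K.filter (fun k => PySem.Str.startswith k "140" || !(td.contains k))).map (fun k => (k, k)) := by
  intro K
  induction K with
  | nil => intro spam n m _ _; simp
  | cons h t ih =>
    intro spam n m hnd hfresh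
    have hfh : spam.contains h = false := hfresh h (by simp)
    have hndt : t.Nodup := hnd.of_cons
    have hht : h ∉ t := by simp at hnd; exact hnd.1
    have hfresh' : ∀ k ∈ t, (spam.insert h h).contains k = false := by
      intro k hk
      rw [PySem.Dict.contains_insert]
      have : (k == h) = false := by
        simp only [beq_eq_false_iff_ne]; intro he; exact hht (he ▸ hk)
      simp [this, hfresh k (List.mem_cons_of_mem _ hk)]
    have hins : (spam.insert h h).items = spam.items ++ [(h, h)] :=
      PySem.Dict.items_insert_of_not_contains _ _ hfh
    by_cases h140 : PySem.Str.startswith h "140" = true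
    · simp only [List.foldl_cons, h140, if_true, List.filter_cons]
      rw [ih _ _ _ hndt hfresh', hins]
      simp
    · have h140f : PySem.Str.startswith h "140" = false := by simpa using h140
      by_cases htd : td.contains h = true
      · simp only [List.foldl_cons, h140f, Bool.false_eq_true, if_false, htd,
          Bool.not_true, Bool.false_eq_true, if_false, List.filter_cons]
        rw [ih _ _ _ hndt (fun k hk => hfresh k (List.mem_cons_of_mem _ hk))]
        simp
      · have htdf : td.contains h = false := by simpa using htd
        simp only [List.foldl_cons, h140f, Bool.false_eq_true, if_false, htdf,
          Bool.not_false, if_true, List.filter_cons]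
        rw [ih _ _ _ hndt hfresh', hins]
        simp

-- membership characterisation of B's spam-key set, for keys drawn from callKeys
theorem spam_contains (callKeys textKeys : List String) (k : String) (hk : k ∈ callKeys) :
    PySem.Set.contains
      (PySem.Set.union (PySem.Set.diff callKeys textKeys)
        (PySem.Set.ofList (callKeys.filter (fun k => PySem.Str.startswith k "140")))) k
    = (PySem.Str.startswith k "140" || !(decide (k ∈ textKeys))) := by
  by_cases h140 : PySem.Str.startswith k "140" = true
  · have hmem : k ∈ PySem.Set.ofList (callKeys.filter (fun k => PySem.Str.startswith k "140")) := by
      rw [PySem.Set.mem_ofList]; exact List.mem_filter.mpr ⟨hk, h140⟩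
    have h140' : PySem.Chars.startswith k.toList ['1', '4', '0'] = true := h140
    simp [PySem.Set.contains, PySem.Set.mem_union, hk, h140']
  · have h140f : PySem.Str.startswith k "140" = false := by simpa using h140
    have hnot : k ∉ PySem.Set.ofList (callKeys.filter (fun k => PySem.Str.startswith k "140")) := by
      simp only [PySem.Set.mem_ofList, List.mem_filter]
      exact fun h => absurd h.2 h140
    have h140f' : PySem.Chars.startswith k.toList ['1', '4', '0'] = false := h140f
    by_cases htx : k ∈ textKeys <;>
      simp [PySem.Set.contains, PySem.Set.mem_union, PySem.Set.mem_diff, htx, h140f', hk]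

-- keys of a dict built from an association list = the set of its first components, in order
theorem keys_ofList_eq (l : List (String × String)) :
    (PySem.Dict.ofList l).keys = PySem.Set.ofList (l.map Prod.fst) := by
  unfold PySem.Dict.ofList PySem.Dict.update
  rw [PySem.Dict.keys_foldl_insert_key (key := Prod.fst) (f := fun _ p => p.2)]
  simp [PySem.Set.update_nil_left]

theorem contains_ofList_eq (l : List (String × String)) (k : String) :
    (PySem.Dict.ofList l).contains k = decide (k ∈ PySem.Set.ofList (l.map Prod.fst)) := by
  rw [← keys_ofList_eq]
  cases h : (PySem.Dict.ofList l).contains k with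
  | true => exact ((decide_eq_true ((PySem.Dict.contains_iff_mem_keys _ _).mp h))).symm
  | false =>
    refine (decide_eq_false ?_).symm
    intro hmem
    exact absurd ((PySem.Dict.contains_iff_mem_keys _ _).mpr hmem) (by simp [h])

-- ===== VERDICT (by name: the statement is the Claim_ definition above) =====
theorem teleMarket_spec : Claim_equal_teleMarket := by
  intro callDict textDict _
  unfold Spec_teleMarket teleMarket teleMarket_alt
  rw [foldA_items _ _ _ _ _ (PySem.Dict.nodup_keys_ofList callDict)
      (fun k _ => PySem.Dict.contains_empty k)]
  rw [show (PySem.Dict.empty : PySem.Dict String String).items = [] from rfl, List.nil_append, keys_ofList_eq]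
  congr 1
  apply List.filter_congr
  intro k hk
  rw [spam_contains _ _ _ hk, contains_ofList_eq]
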